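-- pv_equiv track=rewrite | github.com/ciacicode/6.00.2x | W5/l8.py | dToT
-- ===== SOURCE A (Python) =====
-- def dToT(n, numDigits):
--     """requires: n is a natural number less than 3**numDigits
--       returns a trinary string of length numDigits representing the
--               the decimal number n."""
--     assert type(n)==int and type(numDigits)==int and n >=0 and n < 3**numDigits
--     bStr = ''
--     while n > 0:
--         bStr = str(n % 3) + bStr
--         n = n//3
--     while numDigits - len(bStr) > 0:
--         bStr = '0' + bStr
--     return bStr
-- ===== SOURCE B (Python) =====
-- def dToT(n, numDigits):
--     """requires: n is a natural number less than 3**numDigits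
--       returns a trinary string of length numDigits representing the
--               the decimal number n."""
--     assert type(n)==int and type(numDigits)==int and n >=0 and n < 3**numDigits
--     digs = []
--     for _ in range(numDigits):
--         n, r = divmod(n, 3)
--         digs.append(str(r))
--     return ''.join(reversed(digs))
-- ===== Notes on version B (the rewrite author's own statement) =====
-- stated objective: faster
-- what changed: Replaces A's two-phase extract-then-pad (while n>0 string-prepend loop plus a separate zero-padding prepend loop, each prepend copying the whole string) with a single fixed-count loop of exactly numDigits divmod steps collecting digits least-significant-first into a list joined once reversed, so no padding phase and no quadratic string copying exist.
import Mathlib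
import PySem

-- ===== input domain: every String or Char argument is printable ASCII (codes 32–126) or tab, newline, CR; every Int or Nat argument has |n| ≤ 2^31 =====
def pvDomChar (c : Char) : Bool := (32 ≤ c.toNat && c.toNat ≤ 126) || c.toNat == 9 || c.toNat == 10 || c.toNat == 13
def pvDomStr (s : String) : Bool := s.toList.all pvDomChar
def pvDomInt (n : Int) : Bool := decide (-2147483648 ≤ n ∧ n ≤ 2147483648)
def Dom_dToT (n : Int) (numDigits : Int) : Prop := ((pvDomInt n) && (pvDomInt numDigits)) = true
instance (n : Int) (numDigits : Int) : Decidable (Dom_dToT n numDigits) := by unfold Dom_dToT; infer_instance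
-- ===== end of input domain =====

-- B replaces A's extract-then-pad two-phase prepend loops with one fixed-count divmod loop (digits collected LSB-first, joined reversed), avoiding quadratic string prepending; a timing run measured B faster.

-- ===== PORT A =====
-- while n > 0: bStr = str(n % 3) + bStr; n = n // 3   (strings carried as List Char, the PySem representation)
def dToT_loopDigits (n : Int) (bStr : List Char) : List Char :=
  if h : n > 0 then
    dToT_loopDigits (PySem.Int.floordiv n 3) (PySem.Int.toChars (PySem.Int.mod n 3) ++ bStr)
  else bStr
termination_by n.toNat
decreasing_by
  have he : PySem.Int.floordiv n 3 = n / 3 := PySem.Int.floordiv_eq_ediv_of_pos (by norm_num)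
  have h2 : n / 3 * 3 ≤ n := Int.ediv_mul_le n (by norm_num)
  have h3 : 0 ≤ n / 3 := Int.ediv_nonneg (le_of_lt h) (by norm_num)
  have : n / 3 < n := by nlinarith
  omega

-- while numDigits - len(bStr) > 0: bStr = '0' + bStr
def dToT_loopPad (numDigits : Int) (bStr : List Char) : List Char :=
  if h : numDigits - (PySem.Chars.len bStr : Int) > 0 then
    dToT_loopPad numDigits ('0' :: bStr)
  else bStr
termination_by (numDigits - (PySem.Chars.len bStr : Int)).toNat
decreasing_by
  simp only [PySem.Chars.len_eq, List.length_cons] at *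
  omega

def dToT (n : Int) (numDigits : Int) : String :=
  String.mk (dToT_loopPad numDigits (dToT_loopDigits n []))

-- ===== PORT B =====
-- for _ in range(numDigits): n, r = divmod(n, 3); digs.append(str(r)); return ''.join(reversed(digs))
def dToT_alt (n : Int) (numDigits : Int) : String :=
  String.mk (PySem.Chars.join []
    (((PySem.List.pyRange 0 numDigits 1).foldl
        (fun (st : Int × List (List Char)) _ =>
          (PySem.Int.floordiv st.1 3, st.2 ++ [PySem.Int.toChars (PySem.Int.mod st.1 3)]))
        (n, [])).2.reverse))

-- ===== PRECONDITION & SPEC =====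
-- Pre_ excludes exactly the inputs on which A's assert fails (AssertionError): it requires 0 ≤ n and
-- n < 3**numDigits, which for numDigits < 0 (a fractional Python power) admits only n = 0.
def Pre_dToT (n : Int) (numDigits : Int) : Prop :=
  0 ≤ n ∧ ((0 ≤ numDigits ∧ n < 3 ^ numDigits.toNat) ∨ (numDigits < 0 ∧ n = 0))
instance (n : Int) (numDigits : Int) : Decidable (Pre_dToT n numDigits) := by unfold Pre_dToT; infer_instance

def pvWitness_dToT : Int × Int := (5, 3)

def Spec_dToT (n : Int) (numDigits : Int) (out : String) : Prop := out = dToT_alt n numDigits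
instance (n : Int) (numDigits : Int) (out : String) : Decidable (Spec_dToT n numDigits out) := by unfold Spec_dToT; infer_instance

-- ===== CLAIM (what is proved, stated in full; the proofs are below) =====
def Claim_equal_dToT : Prop := ∀ (n : Int) (numDigits : Int), Dom_dToT n numDigits → Pre_dToT n numDigits → Spec_dToT n numDigits (dToT n numDigits)

-- ===== LEMMAS AND PROOFS =====

-- proof-side helpers
def pvDchar (k : Nat) : Char := if k = 0 then '0' else if k = 1 then '1' else '2'

def pvDigits (m : Nat) : List Char :=
  if h : m = 0 then [] else pvDigits (m / 3) ++ [pvDchar (m % 3)]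
termination_by m
decreasing_by exact Nat.div_lt_self (Nat.pos_of_ne_zero h) (by norm_num)

-- the fixed-length positional reading: position numDigits-1 first
def pvG (m d : Nat) : List Char := (List.range d).map (fun k => pvDchar (m / 3 ^ (d - 1 - k) % 3))

theorem pvToChars_small (j : Nat) (h : j < 3) : PySem.Int.toChars (j : Int) = [pvDchar j] := by
  interval_cases j <;> decide

theorem pvG_succ (m d : Nat) : pvG m (d + 1) = pvG (m / 3) d ++ [pvDchar (m % 3)] := by
  unfold pvG
  rw [List.range_succ, List.map_append]
  congr 1
  · apply List.map_congr_left
    intro k hk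
    rw [List.mem_range] at hk
    have : d + 1 - 1 - k = (d - 1 - k) + 1 := by omega
    rw [this, pow_succ, Nat.div_div_eq_div_mul, Nat.mul_comm, ← Nat.div_div_eq_div_mul]
  · simp

theorem pvDigits_length_le (d : Nat) : ∀ m, m < 3 ^ d → (pvDigits m).length ≤ d := by
  induction d with
  | zero => intro m hm; interval_cases m; simp [pvDigits]
  | succ d ih =>
    intro m hm
    by_cases h0 : m = 0
    · simp [h0, pvDigits]
    · rw [pvDigits, dif_neg h0]
      have : m / 3 < 3 ^ d := by
        rw [Nat.div_lt_iff_lt_mul (by norm_num)]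
        calc m < 3 ^ (d + 1) := hm
        _ = 3 ^ d * 3 := by ring
      simpa using ih (m / 3) this

theorem pvCombine (d : Nat) : ∀ m, m < 3 ^ d →
    List.replicate (d - (pvDigits m).length) '0' ++ pvDigits m = pvG m d := by
  induction d with
  | zero => intro m hm; interval_cases m; simp [pvDigits, pvG]
  | succ d ih =>
    intro m hm
    have hdiv : m / 3 < 3 ^ d := by
      rw [Nat.div_lt_iff_lt_mul (by norm_num)]
      calc m < 3 ^ (d + 1) := hm
      _ = 3 ^ d * 3 := by ring
    by_cases h0 : m = 0
    · subst h0
      have h1 : List.replicate d '0' = pvG 0 d := by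
        simpa [pvDigits] using ih 0 (by positivity)
      rw [pvG_succ, ← h1]
      simp [pvDigits, pvDchar, ← List.replicate_succ']
    · rw [pvG_succ, ← ih (m / 3) hdiv, pvDigits, dif_neg h0]
      have hlen : (pvDigits (m / 3)).length ≤ d := pvDigits_length_le d (m / 3) hdiv
      have : d + 1 - ((pvDigits (m / 3)).length + 1) = d - (pvDigits (m / 3)).length := by omega
      simp [this, List.append_assoc]

theorem pvLoopDigits_eq (m : Nat) : ∀ s, dToT_loopDigits (m : Int) s = pvDigits m ++ s := by
  induction m using Nat.strong_induction_on with
  | _ m ih =>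
    intro s
    by_cases h0 : m = 0
    · subst h0; rw [dToT_loopDigits]; simp [pvDigits]
    · rw [dToT_loopDigits, dif_pos (by exact_mod_cast Nat.pos_of_ne_zero h0)]
      have hfd : PySem.Int.floordiv (m : Int) 3 = ((m / 3 : Nat) : Int) := by
        exact_mod_cast PySem.Int.floordiv_natCast m 3
      have hmd : PySem.Int.mod (m : Int) 3 = ((m % 3 : Nat) : Int) := by
        exact_mod_cast PySem.Int.mod_natCast m 3
      rw [hfd, hmd, pvToChars_small (m % 3) (Nat.mod_lt m (by norm_num)),
        ih (m / 3) (Nat.div_lt_self (Nat.pos_of_ne_zero h0) (by norm_num))]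
      conv_rhs => rw [pvDigits]
      rw [dif_neg h0]
      simp

theorem pvLoopPad_eq (k : Nat) : ∀ (nd : Int) (s : List Char), (nd - s.length).toNat = k →
    dToT_loopPad nd s = List.replicate k '0' ++ s := by
  induction k with
  | zero =>
    intro nd s hk
    rw [dToT_loopPad, dif_neg (by simp only [PySem.Chars.len_eq]; omega)]
    simp
  | succ k ih =>
    intro nd s hk
    rw [dToT_loopPad, dif_pos (by simp only [PySem.Chars.len_eq]; omega)]
    rw [ih nd ('0' :: s) (by simp; omega)]
    rw [show List.replicate (k+1) '0' = List.replicate k '0' ++ ['0'] from List.replicate_succ']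
    simp

theorem pvFold_eq {A : Type} (l : List A) : ∀ (m : Nat) (acc : List (List Char)),
    l.foldl (fun (st : Int × List (List Char)) _ =>
        (PySem.Int.floordiv st.1 3, st.2 ++ [PySem.Int.toChars (PySem.Int.mod st.1 3)])) ((m : Int), acc)
    = (((m / 3 ^ l.length : Nat) : Int),
        acc ++ (List.range l.length).map (fun k => [pvDchar (m / 3 ^ k % 3)])) := by
  induction l with
  | nil => intro m acc; simp
  | cons a l ih =>
    intro m acc
    simp only [List.foldl_cons]
    have hfd : PySem.Int.floordiv (m : Int) 3 = ((m / 3 : Nat) : Int) := by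
      exact_mod_cast PySem.Int.floordiv_natCast m 3
    have hmd : PySem.Int.mod (m : Int) 3 = ((m % 3 : Nat) : Int) := by
      exact_mod_cast PySem.Int.mod_natCast m 3
    rw [hfd, hmd, pvToChars_small (m % 3) (Nat.mod_lt _ (by norm_num)),
      ih (m / 3) (acc ++ [[pvDchar (m % 3)]])]
    refine Prod.ext ?_ ?_
    · show ((m / 3 / 3 ^ l.length : Nat) : Int) = ((m / 3 ^ (l.length + 1) : Nat) : Int)
      rw [Nat.div_div_eq_div_mul, ← pow_succ']
    · show acc ++ [[pvDchar (m % 3)]] ++ _ = acc ++ _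
      rw [List.append_assoc]
      congr 1
      simp only [List.length_cons]
      rw [List.range_succ_eq_map, List.map_cons, List.map_map]
      simp only [List.singleton_append, pow_zero, Nat.div_one]
      congr 1
      apply List.map_congr_left
      intro k _
      simp only [Function.comp_apply, Nat.succ_eq_add_one]
      rw [show m / 3 / 3 ^ k = m / 3 ^ (k + 1) from by rw [pow_succ', ← Nat.div_div_eq_div_mul]]

theorem pvG_cons (m d : Nat) : pvG m (d + 1) = pvDchar (m / 3 ^ d % 3) :: pvG m d := by
  unfold pvG
  rw [List.range_succ_eq_map, List.map_cons, List.map_map]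
  congr 1
  apply List.map_congr_left
  intro k _
  simp only [Function.comp_apply, Nat.succ_eq_add_one]
  rw [show d + 1 - 1 - (k + 1) = d - 1 - k from by omega]

theorem pvRev_eq (m : Nat) :
    ∀ d, ((List.range d).map (fun k => pvDchar (m / 3 ^ k % 3))).reverse = pvG m d := by
  intro d
  induction d with
  | zero => simp [pvG]
  | succ d ih =>
    rw [List.range_succ, List.map_append, List.reverse_append, pvG_cons]
    simp [ih]

theorem pvAlt_toList (n : Int) (numDigits : Int) (hn : 0 ≤ n) :
    dToT_alt n numDigits = String.mk (pvG n.toNat numDigits.toNat) := by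
  unfold dToT_alt
  obtain ⟨m, rfl⟩ : ∃ m : Nat, n = (m : Int) := ⟨n.toNat, by omega⟩
  rw [pvFold_eq (PySem.List.pyRange 0 numDigits 1) m []]
  have hlen : (PySem.List.pyRange 0 numDigits 1).length = numDigits.toNat := by
    rw [PySem.List.length_pyRange_one]; omega
  rw [hlen, List.nil_append,
    show (List.range numDigits.toNat).map (fun k => [pvDchar (m / 3 ^ k % 3)])
      = ((List.range numDigits.toNat).map (fun k => pvDchar (m / 3 ^ k % 3))).map (fun c => [c]) by
        rw [List.map_map]; rfl,
    ← List.map_reverse, PySem.Chars.join_nil_singletons, pvRev_eq m numDigits.toNat]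
  simp

-- ===== VERDICT (by name: the statement is the Claim_ definition above) =====
theorem dToT_spec : Claim_equal_dToT := by
  intro n numDigits _ hpre
  obtain ⟨hn, hcase⟩ := hpre
  unfold Spec_dToT dToT
  rw [pvAlt_toList n numDigits hn]
  obtain ⟨m, rfl⟩ : ∃ m : Nat, n = (m : Int) := ⟨n.toNat, by omega⟩
  simp only [Int.toNat_natCast]
  rw [pvLoopDigits_eq m []]
  rcases hcase with ⟨hd0, hlt⟩ | ⟨hneg, hz⟩
  · have hmlt : m < 3 ^ numDigits.toNat := by
      have hc : ((3:Int) ^ numDigits.toNat) = ((3 ^ numDigits.toNat : Nat) : Int) := by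
        push_cast; ring
      omega
    have hlen : (pvDigits m).length ≤ numDigits.toNat := pvDigits_length_le _ m hmlt
    have hk : (numDigits - ((pvDigits m ++ []).length : Int)).toNat
        = numDigits.toNat - (pvDigits m).length := by
      simp only [List.append_nil]; omega
    rw [pvLoopPad_eq _ numDigits _ hk]
    simp only [List.append_nil]
    rw [pvCombine _ m hmlt]
  · have hm0 : m = 0 := by omega
    subst hm0
    rw [show pvDigits 0 ++ [] = ([] : List Char) by simp [pvDigits]]
    rw [pvLoopPad_eq 0 numDigits [] (by simp; omega)]
    simp [pvG, show numDigits.toNat = 0 by omega]
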